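-- pv_equiv track=rewrite | github.com/dhleekr/algorithm | s2/21611.py | boom
-- ===== SOURCE A (Python) =====
-- def boom(flatten_grid, res):
--     i = len(flatten_grid) - 1
--     boom_cnt = 0
--     while i > 0 :
--         a = flatten_grid[i]
--         cnt = 1
--         while i - cnt >= 0 and flatten_grid[i-cnt] == a:
--             cnt += 1
--
--         if cnt >= 4:
--             for j in range(cnt):
--                 res += flatten_grid[i-j]
--                 boom_cnt += 1
--                 del flatten_grid[i-j]
--         i -= cnt
--
--     return boom_cnt, res
-- ===== SOURCE B (Python) =====
-- def boom(flatten_grid, res):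
--     # One left-to-right pass over consecutive equal runs; rebuilds the list in place like A's deletions.
--     boom_cnt = 0
--     kept = []
--     n = len(flatten_grid)
--     i = 0
--     while i < n:
--         j = i + 1
--         while j < n and flatten_grid[j] == flatten_grid[i]:
--             j += 1
--         run = j - i
--         if run >= 4:
--             boom_cnt += run
--             res += run * flatten_grid[i]
--         else:
--             kept.extend(flatten_grid[i:j])
--         i = j
--     flatten_grid[:] = kept
--     return boom_cnt, res
-- ===== Notes on version B (the rewrite author's own statement) =====
-- stated objective: alternative
-- what changed: B replaces A's right-to-left scan with in-place deletions by a single left-to-right pass that groups consecutive equal runs, accumulates runs of length >= 4 and rebuilds the surviving elements once; the equivalence proved is about the return value, and B also leaves the argument list in the same mutated state as A.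
import Mathlib
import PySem

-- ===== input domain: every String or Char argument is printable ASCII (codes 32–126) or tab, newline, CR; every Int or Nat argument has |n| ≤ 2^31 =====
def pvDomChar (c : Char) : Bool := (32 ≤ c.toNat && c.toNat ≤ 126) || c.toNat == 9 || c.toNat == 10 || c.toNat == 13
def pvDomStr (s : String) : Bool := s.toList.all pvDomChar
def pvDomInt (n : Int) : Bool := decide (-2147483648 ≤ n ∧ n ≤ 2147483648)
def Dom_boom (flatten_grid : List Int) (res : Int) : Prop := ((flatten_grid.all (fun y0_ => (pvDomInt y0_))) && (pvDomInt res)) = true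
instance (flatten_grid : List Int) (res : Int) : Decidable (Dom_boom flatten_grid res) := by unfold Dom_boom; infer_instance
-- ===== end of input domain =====

-- B replaces A's right-to-left scan-with-deletions by one left-to-right pass over consecutive
-- equal runs (equivalence proved about the RETURN value; B also mutates the Python list to the
-- same final state as A, which the Lean ports do not model).

-- ===== PORT A =====
-- inner `while i - cnt >= 0 and flatten_grid[i-cnt] == a: cnt += 1`
def innerCount (xs : List Int) (i : Int) (a : Int) (cnt : Nat) : Nat :=
  if h : 0 ≤ i - cnt ∧ (PySem.List.pyGet? xs (i - cnt)).getD 0 = a then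
    innerCount xs i a (cnt + 1)
  else cnt
termination_by (i + 1 - cnt).toNat
decreasing_by obtain ⟨h1, -⟩ := h; omega

theorem innerCount_ge (xs : List Int) (i : Int) (a : Int) (cnt : Nat) :
    cnt ≤ innerCount xs i a cnt := by
  fun_induction innerCount with
  | case1 cnt h ih => omega
  | case2 cnt h => omega

-- body of `for j in range(cnt): res += flatten_grid[i-j]; boom_cnt += 1; del flatten_grid[i-j]`
-- state = (flatten_grid, res, boom_cnt)
def delStep (i : Int) (st : List Int × Int × Int) (j : Int) : List Int × Int × Int :=
  let res' := st.2.1 + (PySem.List.pyGet? st.1 (i - j)).getD 0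
  let bc' := st.2.2 + 1
  let xs' := ((PySem.List.pop? st.1 (i - j)).map Prod.snd).getD st.1
  (xs', res', bc')

def boomLoop (xs : List Int) (i : Int) (bc : Int) (res : Int) : Int × Int :=
  if h : 0 < i then
    let a := (PySem.List.pyGet? xs i).getD 0
    let cnt := innerCount xs i a 1
    if 4 ≤ cnt then
      let st := (PySem.List.pyRange 0 cnt 1).foldl (delStep i) (xs, res, bc)
      boomLoop st.1 (i - cnt) st.2.2 st.2.1
    else
      boomLoop xs (i - cnt) bc res
  else (bc, res)
termination_by i.toNat
decreasing_by
  · have := innerCount_ge xs i ((PySem.List.pyGet? xs i).getD 0) 1; omega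
  · have := innerCount_ge xs i ((PySem.List.pyGet? xs i).getD 0) 1; omega

def boom (flatten_grid : List Int) (res : Int) : Int × Int :=
  boomLoop flatten_grid ((flatten_grid.length : Int) - 1) 0 res

-- ===== PORT B =====
-- inner `while j < n and flatten_grid[j] == flatten_grid[i]: j += 1` (a = flatten_grid[i])
def scanB (xs : List Int) (n : Nat) (a : Int) (j : Nat) : Nat :=
  if h : j < n ∧ xs.getD j 0 = a then scanB xs n a (j + 1) else j
termination_by n - j

theorem scanB_ge (xs : List Int) (n : Nat) (a : Int) (j : Nat) : j ≤ scanB xs n a j := by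
  fun_induction scanB with
  | case1 j h ih => omega
  | case2 => omega

def boomAltLoop (xs : List Int) (n : Nat) (i : Nat) (kept : List Int) (bc : Int) (res : Int) :
    Int × Int :=
  if h : i < n then
    let a := xs.getD i 0
    let j := scanB xs n a (i + 1)
    let run : Nat := j - i
    if 4 ≤ run then
      boomAltLoop xs n j kept (bc + (run : Int)) (res + (run : Int) * a)
    else
      boomAltLoop xs n j (kept ++ PySem.List.slice xs (some (i : Int)) (some (j : Int))) bc res
  else (bc, res)
termination_by n - i
decreasing_by
  all_goals have := scanB_ge xs n (xs.getD i 0) (i + 1); omega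

def boom_alt (flatten_grid : List Int) (res : Int) : Int × Int :=
  boomAltLoop flatten_grid flatten_grid.length 0 [] 0 res

-- ===== PRECONDITION & SPEC =====
def Spec_boom (flatten_grid : List Int) (res : Int) (out : Int × Int) : Prop := out = boom_alt flatten_grid res
instance (flatten_grid : List Int) (res : Int) (out : Int × Int) : Decidable (Spec_boom flatten_grid res out) := by unfold Spec_boom; infer_instance

-- ===== CLAIM (what is proved, stated in full; the proofs are below) =====
def Claim_equal_boom : Prop := ∀ (flatten_grid : List Int) (res : Int), Dom_boom flatten_grid res → Spec_boom flatten_grid res (boom flatten_grid res)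

-- ===== LEMMAS AND PROOFS =====

-- length of the run of value `a` at the head of the list
def runLen (a : Int) : List Int → Nat
  | [] => 0
  | b :: t => if b = a then runLen a t + 1 else 0

-- reference function: fold over the consecutive-equal runs, runs of length ≥ 4 contribute
def fSpec : List Int → Int × Int
  | [] => (0, 0)
  | a :: t =>
    let k := runLen a t + 1
    let p := fSpec (t.drop (runLen a t))
    if 4 ≤ k then (p.1 + (k : Int), p.2 + (k : Int) * a) else p
termination_by l => l.length
decreasing_by simp

theorem runLen_le_length (a : Int) (l : List Int) : runLen a l ≤ l.length := by
  induction l with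
  | nil => simp [runLen]
  | cons b t ih => simp only [runLen]; split <;> simp <;> omega

theorem runLen_take (a : Int) (l : List Int) :
    l.take (runLen a l) = List.replicate (runLen a l) a := by
  induction l with
  | nil => simp [runLen]
  | cons b t ih =>
    simp only [runLen]; split
    · next hb => subst hb; simpa [List.replicate_succ] using ih
    · simp

theorem runLen_head_drop (a : Int) (l : List Int) :
    (l.drop (runLen a l)).head? ≠ some a := by
  induction l with
  | nil => simp [runLen]
  | cons b t ih =>
    simp only [runLen]; split
    · simpa using ih
    · next hb => simpa using hb

theorem runLen_replicate (a : Int) (k : Nat) : runLen a (List.replicate k a) = k := by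
  induction k with
  | zero => simp [runLen]
  | succ k ih => simp [List.replicate_succ, runLen, ih]

theorem runLen_append (a : Int) (u v : List Int) :
    runLen a (u ++ v) =
      if runLen a u < u.length then runLen a u else u.length + runLen a v := by
  induction u with
  | nil => simp [runLen]
  | cons b t ih =>
    simp only [List.cons_append, runLen]
    split
    · next hb =>
      rw [ih]
      have := runLen_le_length a t
      by_cases h : runLen a t < t.length <;> simp [h] <;> omega
    · simp

theorem take_reverse_cons (xs : List Int) (k : Nat) (hk : k < xs.length) :
    (xs.take (k + 1)).reverse = xs[k] :: (xs.take k).reverse := by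
  rw [List.take_add_one]
  simp [List.getElem?_eq_getElem hk]

-- innerCount counts the run ending at index i (reading leftwards)
theorem innerCount_spec (xs : List Int) (i : Int) (a : Int) (c : Nat)
    (hi0 : 0 ≤ i) (hil : i < (xs.length : Int)) :
    innerCount xs i a c = c + runLen a ((xs.take (i.toNat + 1 - c)).reverse) := by
  fun_induction innerCount with
  | case1 c h ih =>
    obtain ⟨h1, h2⟩ := h
    have hk : i.toNat - c < xs.length := by omega
    have hgd : (PySem.List.pyGet? xs (i - c)).getD 0 = xs[i.toNat - c] := by
      rw [PySem.List.pyGet?_eq_some_getElem _ h1 (by omega)]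
      simp only [Option.getD_some]
      congr 1
      omega
    rw [h2] at hgd  -- hgd : a = xs[i.toNat - c]  (after symm)
    have hstep : i.toNat + 1 - c = (i.toNat - c) + 1 := by omega
    rw [ih, hstep, take_reverse_cons xs (i.toNat - c) hk]
    simp only [runLen, ← hgd, if_pos rfl, reduceIte]
    have : i.toNat + 1 - (c + 1) = i.toNat - c := by omega
    rw [this]
    omega
  | case2 c h =>
    by_cases h1 : 0 ≤ i - (c : Int)
    · have h2 : (PySem.List.pyGet? xs (i - c)).getD 0 ≠ a := fun hv => h ⟨h1, hv⟩
      have hk : i.toNat - c < xs.length := by omega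
      have hgd : (PySem.List.pyGet? xs (i - c)).getD 0 = xs[i.toNat - c] := by
        rw [PySem.List.pyGet?_eq_some_getElem _ h1 (by omega)]
        simp only [Option.getD_some]
        congr 1
        omega
      rw [hgd] at h2
      have hstep : i.toNat + 1 - c = (i.toNat - c) + 1 := by omega
      rw [hstep, take_reverse_cons xs (i.toNat - c) hk]
      simp [runLen, h2]
    · have h0 : i.toNat + 1 - c = 0 := by omega
      rw [h0]
      simp [runLen]

-- the deletion loop removes the trailing run and accumulates its sum
theorem eraseIdx_mid (q rest : List Int) (x : Int) :
    (q ++ x :: rest).eraseIdx q.length = q ++ rest := by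
  simp [List.eraseIdx_append]

theorem delfold (m : Nat) : ∀ (q rest : List Int) (a res bc : Int),
    (PySem.List.pyRange 0 m 1).foldl (delStep ((q.length : Int) + m - 1))
      (q ++ List.replicate m a ++ rest, res, bc)
    = (q ++ rest, res + m * a, bc + m) := by
  induction m with
  | zero =>
    intro q rest a res bc
    simp [PySem.List.pyRange_zero]
  | succ m ih =>
    intro q rest a res bc
    have hrange : PySem.List.pyRange 0 ((m + 1 : Nat) : Int) 1
        = PySem.List.pyRange 0 (m : Int) 1 ++ [(m : Int)] := by
      push_cast
      exact PySem.List.pyRange_one_succ_right (by omega)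
    have hlist : q ++ List.replicate (m + 1) a ++ rest
        = (q ++ [a]) ++ List.replicate m a ++ rest := by
      simp [List.replicate_succ]
    have hi : (q.length : Int) + ((m + 1 : Nat) : Int) - 1
        = (((q ++ [a]).length : Int) + (m : Int) - 1) := by
      simp
      push_cast
      ring
    rw [hrange, hi, hlist, List.foldl_append, ih (q ++ [a]) rest a res bc]
    -- one last deletion at index q.length
    have hidx : (q.length : Int) + 1 + (m : Int) - 1 - (m : Int) = (q.length : Int) := by ring
    show delStep _ (q ++ [a] ++ rest, res + m * a, bc + m) (m : Int) = _
    unfold delStep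
    simp only [List.append_assoc, List.singleton_append, List.length_append, List.length_cons,
      List.length_nil, Nat.cast_add, Nat.cast_one, Nat.cast_zero, zero_add, hidx]
    rw [PySem.List.pyGet?_append_length, PySem.List.pop?_natCast (q ++ a :: rest) q.length (by simp),
      eraseIdx_mid]
    simp only [Option.map_some, Option.getD_some]
    refine Prod.ext rfl (Prod.ext ?_ ?_) <;> simp <;> push_cast <;> ring

-- main invariant for A's outer loop: only the prefix of length i+1 matters
theorem fSpec_short (p : List Int) (h : p.length ≤ 1) : fSpec p = (0, 0) := by
  match p, h with
  | [], _ => simp [fSpec]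
  | [x], _ => simp [fSpec, runLen]

theorem boomLoop_step (xs : List Int) (i bc res : Int) (h : 0 < i) :
    boomLoop xs i bc res =
      (if 4 ≤ innerCount xs i ((PySem.List.pyGet? xs i).getD 0) 1 then
        boomLoop
          (List.foldl (delStep i) (xs, res, bc)
            (PySem.List.pyRange 0 ((innerCount xs i ((PySem.List.pyGet? xs i).getD 0) 1 : Nat) : Int))).1
          (i - ((innerCount xs i ((PySem.List.pyGet? xs i).getD 0) 1 : Nat) : Int))
          (List.foldl (delStep i) (xs, res, bc)
            (PySem.List.pyRange 0 ((innerCount xs i ((PySem.List.pyGet? xs i).getD 0) 1 : Nat) : Int))).2.2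
          (List.foldl (delStep i) (xs, res, bc)
            (PySem.List.pyRange 0 ((innerCount xs i ((PySem.List.pyGet? xs i).getD 0) 1 : Nat) : Int))).2.1
      else boomLoop xs (i - ((innerCount xs i ((PySem.List.pyGet? xs i).getD 0) 1 : Nat) : Int)) bc res) := by
  rw [boomLoop, dif_pos h]

theorem boomLoop_spec_aux (N : Nat) : ∀ (p : List Int), p.length ≤ N →
    ∀ (rest : List Int) (bc res : Int),
    boomLoop (p ++ rest) ((p.length : Int) - 1) bc res
      = (bc + (fSpec p.reverse).1, res + (fSpec p.reverse).2) := by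
  induction N with
  | zero =>
    intro p hlen rest bc res
    have hnil : p = [] := List.eq_nil_of_length_eq_zero (by omega)
    subst hnil
    rw [boomLoop]
    simp [fSpec]
  | succ N ihN =>
    intro p hlen rest bc res
    by_cases hn : p.length ≤ 1
    · rw [boomLoop, dif_neg (by push_cast; omega), fSpec_short p.reverse (by simpa using hn)]
      simp
    · -- p.length ≥ 2
      push_neg at hn
      set n := p.length with hndef
      have hpos : (0:Int) < (n : Int) - 1 := by push_cast; omega
      -- the element at index n-1 is the last of p
      have hget : (PySem.List.pyGet? (p ++ rest) ((n : Int) - 1)).getD 0 = p[n-1]'(by omega) := by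
        rw [PySem.List.pyGet?_eq_some_getElem (p ++ rest) (by omega)
          (by simp only [List.length_append]; push_cast; omega)]
        simp only [Option.getD_some]
        rw [List.getElem_append_left (by omega)]
        congr 1
        omega
      set a := p[n-1]'(by omega) with hadef
      -- the inner while loop counts the trailing run of the prefix
      have htake : (p ++ rest).take (((n : Int) - 1).toNat + 1 - 1) = p.take (n - 1) := by
        rw [show ((n : Int) - 1).toNat + 1 - 1 = n - 1 from by omega,
          List.take_append_of_le_length (by omega)]
      set tr := (p.take (n - 1)).reverse with htrdef
      set r := runLen a tr with hrdef
      have hr_le : r ≤ n - 1 := by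
        have h1 := runLen_le_length a tr
        have h2 : tr.length = n - 1 := by
          rw [htrdef, List.length_reverse, List.length_take]
          omega
        omega
      have hcnt : innerCount (p ++ rest) ((n : Int) - 1) a 1 = 1 + r := by
        rw [innerCount_spec (p ++ rest) ((n : Int) - 1) a 1 (by omega)
          (by simp only [List.length_append]; push_cast; omega), htake]
      -- p.reverse = a :: tr
      have hrev : p.reverse = a :: tr := by
        have h1 := take_reverse_cons p (n - 1) (by omega)
        rw [show n - 1 + 1 = n from by omega] at h1
        rw [show p.take n = p from by rw [hndef]; exact List.take_length] at h1
        exact h1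
      -- decomposition: p = q ++ replicate (r+1) a with q the untouched prefix
      set q := p.take (n - 1 - r) with hqdef
      have hqlen : q.length = n - 1 - r := by
        rw [hqdef, List.length_take]
        omega
      have htrdrop : tr.drop r = q.reverse := by
        rw [htrdef, List.drop_reverse, List.length_take, List.take_take, hqdef]
        congr 2
        omega
      have hpdec : p = q ++ List.replicate (r + 1) a := by
        have h2 : p = tr.reverse ++ [a] := by
          conv_lhs => rw [← List.reverse_reverse p]
          rw [hrev]
          simp
        have h3 : tr.reverse = q ++ List.replicate r a := by
          conv_lhs => rw [← List.take_append_drop r tr, runLen_take a tr, ← hrdef]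
          rw [List.reverse_append, htrdrop]
          simp
        rw [h2, h3, List.replicate_succ' (n := r)]
        simp
      -- fSpec of the reversed prefix, one run peeled
      have hfs : fSpec p.reverse =
          (if 4 ≤ r + 1 then
            ((fSpec q.reverse).1 + ((r+1 : Nat) : Int), (fSpec q.reverse).2 + ((r+1 : Nat) : Int) * a)
          else fSpec q.reverse) := by
        rw [hrev]
        simp only [fSpec, ← hrdef, htrdrop]
      rw [boomLoop_step (p ++ rest) ((n : Int) - 1) bc res hpos, hget, hcnt]
      by_cases h4 : 4 ≤ 1 + r
      · rw [if_pos (by omega)]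
        have hfold : (PySem.List.pyRange 0 ((1 + r : Nat) : Int)).foldl
            (delStep ((n : Int) - 1)) (p ++ rest, res, bc)
            = (q ++ rest, res + ((r+1 : Nat) : Int) * a, bc + ((r+1 : Nat) : Int)) := by
          have hi : ((n : Int) - 1) = ((q.length : Int) + ((r + 1 : Nat) : Int) - 1) := by
            rw [hqlen]
            push_cast
            omega
          have hx : p ++ rest = q ++ List.replicate (r + 1) a ++ rest := by
            rw [← hpdec]
          rw [hi, hx, (by push_cast; ring : ((1 + r : Nat) : Int) = ((r + 1 : Nat) : Int)),
            delfold (r + 1) q rest a res bc]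
        rw [hfold]
        have hq_i : (n : Int) - 1 - ((1 + r : Nat) : Int) = (q.length : Int) - 1 := by
          rw [hqlen]
          push_cast
          omega
        rw [hq_i, ihN q (by omega) rest (bc + ((r+1 : Nat) : Int)) (res + ((r+1 : Nat) : Int) * a)]
        rw [hfs, if_pos (by omega)]
        refine Prod.ext ?_ ?_ <;> simp <;> push_cast <;> ring
      · rw [if_neg (by omega)]
        have hsplit : p ++ rest = q ++ (p.drop (n - 1 - r) ++ rest) := by
          rw [← List.append_assoc, hqdef, List.take_append_drop]
        have hq_i : (n : Int) - 1 - ((1 + r : Nat) : Int) = (q.length : Int) - 1 := by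
          rw [hqlen]
          push_cast
          omega
        rw [hsplit, hq_i, ihN q (by omega) (p.drop (n - 1 - r) ++ rest) bc res]
        rw [hfs, if_neg (by omega)]

theorem boomLoop_spec (p : List Int) (rest : List Int) (bc res : Int) :
    boomLoop (p ++ rest) ((p.length : Int) - 1) bc res
      = (bc + (fSpec p.reverse).1, res + (fSpec p.reverse).2) :=
  boomLoop_spec_aux p.length p (le_refl _) rest bc res

theorem scanB_spec (xs : List Int) (a : Int) (j : Nat) :
    scanB xs xs.length a j = j + runLen a (xs.drop j) := by
  fun_induction scanB with
  | case1 j h ih =>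
    obtain ⟨hj, hv⟩ := h
    rw [List.getD_eq_getElem xs 0 hj] at hv
    rw [ih, List.drop_eq_getElem_cons hj]
    simp [runLen, hv]
    omega
  | case2 j h =>
    by_cases hj : j < xs.length
    · have hv : xs.getD j 0 ≠ a := fun hv => h ⟨hj, hv⟩
      rw [List.getD_eq_getElem xs 0 hj] at hv
      rw [List.drop_eq_getElem_cons hj]
      simp [runLen, hv]
    · rw [List.drop_eq_nil_of_le (by omega)]
      simp [runLen]

theorem boomAltLoop_spec (xs : List Int) (i : Nat) (kept : List Int) (bc res : Int) :
    boomAltLoop xs xs.length i kept bc res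
      = (bc + (fSpec (xs.drop i)).1, res + (fSpec (xs.drop i)).2) := by
  fun_induction boomAltLoop with
  | case1 i kept bc res h a j run hrun ih =>
    have ha : a = xs[i] := List.getD_eq_getElem xs 0 h
    have hj : j = (i + 1) + runLen a (xs.drop (i + 1)) := scanB_spec xs a (i + 1)
    have hr0 : run = j - i := rfl
    rw [ha] at hj
    have hdd : (xs.drop (i + 1)).drop (runLen xs[i] (xs.drop (i + 1))) = xs.drop j := by
      rw [List.drop_drop]; congr 1; omega
    rw [ih, List.drop_eq_getElem_cons h]
    simp only [fSpec]
    rw [hdd, if_pos (by omega)]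
    have hk : (run : Int) = (runLen xs[i] (xs.drop (i + 1)) : Int) + 1 := by
      push_cast; omega
    rw [ha, hk]
    refine Prod.ext ?_ ?_ <;> simp <;> ring
  | case2 i kept bc res h a j run hrun ih =>
    have ha : a = xs[i] := List.getD_eq_getElem xs 0 h
    have hj : j = (i + 1) + runLen a (xs.drop (i + 1)) := scanB_spec xs a (i + 1)
    have hr0 : run = j - i := rfl
    rw [ha] at hj
    have hdd : (xs.drop (i + 1)).drop (runLen xs[i] (xs.drop (i + 1))) = xs.drop j := by
      rw [List.drop_drop]; congr 1; omega
    rw [ih, List.drop_eq_getElem_cons h]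
    simp only [fSpec]
    rw [hdd, if_neg (by omega)]
  | case3 i kept bc res h =>
    rw [List.drop_eq_nil_of_le (by omega)]
    simp [fSpec]

theorem runLen_ne_zero (b a : Int) (t : List Int) (hba : b ≠ a) :
    runLen a (b :: t) = 0 := by
  simp [runLen, hba]

theorem fSpec_replicate (m : Nat) (a : Int) (hm : 1 ≤ m) :
    fSpec (List.replicate m a) = (if 4 ≤ m then ((m : Int), (m : Int) * a) else (0, 0)) := by
  obtain ⟨m', rfl⟩ : ∃ m', m = m' + 1 := ⟨m - 1, by omega⟩
  rw [List.replicate_succ]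
  simp only [fSpec, runLen_replicate]
  rw [List.drop_eq_nil_of_le (by simp)]
  simp [fSpec]

theorem fSpec_append_run_aux (n : Nat) : ∀ (l : List Int), l.length ≤ n →
    ∀ (m : Nat) (a : Int), 1 ≤ m → l.getLast? ≠ some a →
    fSpec (l ++ List.replicate m a) =
      (if 4 ≤ m then ((fSpec l).1 + (m : Int), (fSpec l).2 + (m : Int) * a) else fSpec l) := by
  induction n with
  | zero =>
    intro l hlen m a hm _
    have hnil : l = [] := List.eq_nil_of_length_eq_zero (by omega)
    subst hnil
    simp only [List.nil_append, fSpec, fSpec_replicate m a hm]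
    split <;> simp
  | succ n ihn =>
    intro l hlen m a hm hl
    match l with
    | [] =>
      simp only [List.nil_append, fSpec, fSpec_replicate m a hm]
      split <;> simp
    | b :: t =>
      have hr := runLen_le_length b t
      -- the leading run of (b :: t) ++ replicate m a is exactly the leading run of b :: t
      have hruns : runLen b (t ++ List.replicate m a) = runLen b t := by
        rw [runLen_append]
        by_cases hlt : runLen b t < t.length
        · simp [hlt]
        · have hteq : t = List.replicate t.length b := by
            have h1 := runLen_take b t
            rw [(by omega : runLen b t = t.length), List.take_length] at h1
            exact h1
          have hba : b ≠ a := by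
            intro hba
            apply hl
            subst hba
            rw [List.getLast?_cons]
            cases hgl : t.getLast? with
            | none => simp
            | some x =>
              have hx : x ∈ t := List.mem_of_getLast? hgl
              rw [hteq] at hx
              have := List.eq_of_mem_replicate hx
              simp [this]
          have hrep0 : runLen b (List.replicate m a) = 0 := by
            obtain ⟨m', rfl⟩ : ∃ m', m = m' + 1 := ⟨m - 1, by omega⟩
            rw [List.replicate_succ]
            exact runLen_ne_zero a b _ (Ne.symm hba)
          rw [hrep0]
          simp only [if_neg hlt]
          omega
      have hdrop : (t ++ List.replicate m a).drop (runLen b t)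
          = t.drop (runLen b t) ++ List.replicate m a :=
        List.drop_append_of_le_length hr
      have hlast : (t.drop (runLen b t)).getLast? ≠ some a := by
        rw [List.getLast?_drop]
        by_cases hle : t.length ≤ runLen b t
        · simp [hle]
        · rw [if_neg hle]
          intro hgl
          apply hl
          rw [List.getLast?_cons, hgl]
          simp
      have ihd := ihn (t.drop (runLen b t))
        (by simp only [List.length_drop]; simp only [List.length_cons] at hlen; omega) m a hm hlast
      simp only [List.cons_append, fSpec, hruns, hdrop, ihd]
      by_cases h4 : 4 ≤ runLen b t + 1 <;> by_cases h4m : 4 ≤ m <;>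
        simp only [h4, h4m, if_true, if_false, reduceIte] <;>
        refine Prod.ext ?_ ?_ <;> simp <;> ring

theorem fSpec_append_run (l : List Int) (m : Nat) (a : Int) (hm : 1 ≤ m)
    (hl : l.getLast? ≠ some a) :
    fSpec (l ++ List.replicate m a) =
      (if 4 ≤ m then ((fSpec l).1 + (m : Int), (fSpec l).2 + (m : Int) * a) else fSpec l) :=
  fSpec_append_run_aux l.length l (le_refl _) m a hm hl

theorem fSpec_reverse_aux (n : Nat) : ∀ l : List Int, l.length ≤ n → fSpec l.reverse = fSpec l := by
  induction n with
  | zero =>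
    intro l hlen
    have hnil : l = [] := List.eq_nil_of_length_eq_zero (by omega)
    subst hnil
    rfl
  | succ n ihn =>
    intro l hlen
    match l with
    | [] => rfl
    | b :: t =>
      have hr := runLen_le_length b t
      have hdec : b :: t = List.replicate (runLen b t + 1) b ++ t.drop (runLen b t) := by
        rw [List.replicate_succ, List.cons_append]
        congr 1
        conv_lhs => rw [← List.take_append_drop (runLen b t) t]
        rw [runLen_take]
      have hlast : ((t.drop (runLen b t)).reverse).getLast? ≠ some b := by
        rw [List.getLast?_reverse]
        exact runLen_head_drop b t
      have h1 : (b :: t).reverse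
          = (t.drop (runLen b t)).reverse ++ List.replicate (runLen b t + 1) b := by
        conv_lhs => rw [hdec]
        rw [List.reverse_append, List.reverse_replicate]
      rw [h1, fSpec_append_run _ (runLen b t + 1) b (by omega) hlast,
        ihn (t.drop (runLen b t))
          (by simp only [List.length_drop]; simp only [List.length_cons] at hlen; omega)]
      simp only [fSpec]

theorem fSpec_reverse (l : List Int) : fSpec l.reverse = fSpec l :=
  fSpec_reverse_aux l.length l (le_refl _)

-- ===== VERDICT (by name: the statement is the Claim_ definition above) =====
theorem boom_spec : Claim_equal_boom := by
  intro xs res _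
  unfold Spec_boom boom boom_alt
  have hA := boomLoop_spec xs [] 0 res
  have hB := boomAltLoop_spec xs 0 [] 0 res
  rw [List.append_nil] at hA
  simp only [List.drop_zero] at hB
  rw [hA, hB, fSpec_reverse]
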